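-- pv_equiv track=rewrite | github.com/algheim/Rubik-s-Cube | beginner_method.py | calculate_empty_spots
-- ===== SOURCE A (Python) =====
-- corner_list = [0, 2, 6, 8]
--
-- def calculate_empty_spots(cube_list):
--     empty_spots = []
--     c = 0
--     for sticker in cube_list[5]:
--         if c in corner_list and sticker != 5:
--             if c == 0:
--                 empty_spots.append(6)
--             elif c == 2:
--                 empty_spots.append(8)
--             elif c == 6:
--                 empty_spots.append(0)
--             elif c == 8:
--                 empty_spots.append(2)
--
--         c += 1
--
--     return empty_spots
-- ===== SOURCE B (Python) =====
-- # B: compute a 4-bit "unsolved corner" mask and return the answer from a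
-- # precomputed 16-entry table, instead of conditionally appending per sticker.
-- _TABLE = [
--     [], [6], [8], [6, 8],
--     [0], [6, 0], [8, 0], [6, 8, 0],
--     [2], [6, 2], [8, 2], [6, 8, 2],
--     [0, 2], [6, 0, 2], [8, 0, 2], [6, 8, 0, 2],
-- ]
--
-- def calculate_empty_spots(cube_list):
--     face = cube_list[5]
--     mask = 0
--     for bit, pos in enumerate((0, 2, 6, 8)):
--         if pos < len(face) and face[pos] != 5:
--             mask |= 1 << bit
--     return _TABLE[mask]
-- ===== Notes on version B (the rewrite author's own statement) =====
-- stated objective: alternative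
-- what changed: Replaces A's 9-sticker counter loop with conditional appends by computing a 4-bit unsolved-corner mask and returning the result with one lookup in a precomputed 16-entry table.
import Mathlib
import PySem

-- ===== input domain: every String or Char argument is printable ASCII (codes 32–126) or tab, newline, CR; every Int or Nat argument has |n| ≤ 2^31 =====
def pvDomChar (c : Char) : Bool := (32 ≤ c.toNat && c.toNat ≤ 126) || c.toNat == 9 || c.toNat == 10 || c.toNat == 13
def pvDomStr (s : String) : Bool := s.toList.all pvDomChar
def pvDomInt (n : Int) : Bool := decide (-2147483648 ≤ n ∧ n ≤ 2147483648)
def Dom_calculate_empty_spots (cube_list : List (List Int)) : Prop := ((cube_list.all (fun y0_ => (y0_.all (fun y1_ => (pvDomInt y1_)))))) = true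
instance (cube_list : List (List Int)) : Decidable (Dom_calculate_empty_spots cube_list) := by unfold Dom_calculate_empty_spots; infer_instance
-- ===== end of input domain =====

-- B computes a 4-bit unsolved-corner mask and answers by one lookup in a precomputed
-- 16-entry table, instead of A's counter loop with conditional appends (alternative).

-- ===== PORT A =====
def corner_list : List Int := [0, 2, 6, 8]

-- one iteration of A's 'for sticker in cube_list[5]' loop; state = (empty_spots, c)
def pvStepA (st : List Int × Int) (sticker : Int) : List Int × Int :=
  let empty_spots := st.1
  let c := st.2
  let empty_spots :=
    if c ∈ corner_list ∧ sticker ≠ 5 then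
      if c = 0 then empty_spots ++ [6]
      else if c = 2 then empty_spots ++ [8]
      else if c = 6 then empty_spots ++ [0]
      else if c = 8 then empty_spots ++ [2]
      else empty_spots
    else empty_spots
  (empty_spots, c + 1)

def calculate_empty_spots (cube_list : List (List Int)) : List Int :=
  match PySem.List.pyGet? cube_list 5 with
  | none => []   -- Python raises IndexError here; excluded by Pre_
  | some face => (face.foldl pvStepA ([], 0)).1

-- ===== PORT B =====
def pvTable : List (List Int) :=
  [[], [6], [8], [6, 8],
   [0], [6, 0], [8, 0], [6, 8, 0],
   [2], [6, 2], [8, 2], [6, 8, 2],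
   [0, 2], [6, 0, 2], [8, 0, 2], [6, 8, 0, 2]]

-- Source B's 'for bit, pos in enumerate((0, 2, 6, 8))' mask loop
def pvMask (face : List Int) : Nat :=
  [(0, 0), (1, 2), (2, 6), (3, 8)].foldl
    (fun mask bp =>
      if bp.2 < face.length ∧ face.getD bp.2 0 ≠ 5 then mask ||| (1 <<< bp.1) else mask)
    0

def calculate_empty_spots_alt (cube_list : List (List Int)) : List Int :=
  match PySem.List.pyGet? cube_list 5 with
  | none => []   -- Python raises IndexError here; excluded by Pre_
  | some face => pvTable.getD (pvMask face) []

-- ===== PRECONDITION & SPEC =====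
-- Pre_: Python A evaluates cube_list[5], which raises IndexError unless the list has ≥ 6 faces.
def Pre_calculate_empty_spots (cube_list : List (List Int)) : Prop := 6 ≤ cube_list.length
instance (cube_list : List (List Int)) : Decidable (Pre_calculate_empty_spots cube_list) := by
  unfold Pre_calculate_empty_spots; infer_instance

def pvWitness_calculate_empty_spots : List (List Int) :=
  [[5,5,5,5,5,5,5,5,5],[0,0,0,0,0,0,0,0,0],[1,1,1,1,1,1,1,1,1],
   [2,2,2,2,2,2,2,2,2],[3,3,3,3,3,3,3,3,3],[5,1,5,5,5,5,2,5,5]]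

def Spec_calculate_empty_spots (cube_list : List (List Int)) (out : List Int) : Prop := out = calculate_empty_spots_alt cube_list
instance (cube_list : List (List Int)) (out : List Int) : Decidable (Spec_calculate_empty_spots cube_list out) := by unfold Spec_calculate_empty_spots; infer_instance

-- ===== CLAIM =====
def Claim_equal_calculate_empty_spots : Prop := ∀ (cube_list : List (List Int)), Dom_calculate_empty_spots cube_list → Pre_calculate_empty_spots cube_list → Spec_calculate_empty_spots cube_list (calculate_empty_spots cube_list)

-- ===== LEMMAS AND PROOFS =====

-- once the counter is past 8, A's loop appends nothing more
lemma pvTail (rest : List Int) : ∀ (acc : List Int) (c : Int), 9 ≤ c →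
    (rest.foldl pvStepA (acc, c)).1 = acc := by
  induction rest with
  | nil => intro acc c _; rfl
  | cons x xs ih =>
      intro acc c hc
      simp only [List.foldl_cons]
      have hmem : ¬ (c ∈ corner_list ∧ x ≠ 5) := by
        rintro ⟨hm, -⟩
        simp [corner_list] at hm
        omega
      simp only [pvStepA, if_neg hmem]
      exact ih acc (c + 1) (by omega)

lemma pvTail9 (rest acc : List Int) : (rest.foldl pvStepA (acc, 9)).1 = acc :=
  pvTail rest acc 9 (by norm_num)

lemma pvFace_eq (face : List Int) :
    (face.foldl pvStepA ([], 0)).1 = pvTable.getD (pvMask face) [] := by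
  rcases face with _ | ⟨a0, _ | ⟨a1, _ | ⟨a2, _ | ⟨a3, _ | ⟨a4, _ | ⟨a5, _ | ⟨a6, _ | ⟨a7, _ | ⟨a8, rest⟩⟩⟩⟩⟩⟩⟩⟩⟩ <;>
    simp [pvStepA, pvMask, pvTable, corner_list, pvTail9] <;>
    split_ifs <;> simp_all

-- ===== VERDICT =====
theorem calculate_empty_spots_spec : Claim_equal_calculate_empty_spots := by
  intro cube_list _ hpre
  unfold Spec_calculate_empty_spots calculate_empty_spots calculate_empty_spots_alt
  have hlen : 5 < cube_list.length := hpre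
  have h5 := PySem.List.pyGet?_ofNat cube_list 5 hlen
  norm_num at h5
  simp only [h5]
  exact pvFace_eq _
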